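-- pv_equiv track=rewrite | github.com/abphilip-codes/Hackerrank_Preparation | 1W/7/3.py | noPrefix
-- ===== SOURCE A (Python) =====
-- def noPrefix(words):
--     p = {}
--     h = {}
--     for z in words:
--         c = ''
--         if z in p: return f'BAD SET\n{z}'
--         for l in z:
--             c+=l
--             p[c] = 1
--             if c in h: return f'BAD SET\n{z}'
--         h[z] = 1
--     return f'GOOD SET'
-- ===== SOURCE B (Python) =====
-- def noPrefix(words):
--     seen = []
--     for z in words:
--         for w in seen:
--             if (z and w.startswith(z)) or (w and z.startswith(w)):
--                 return f'BAD SET\n{z}'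
--         seen.append(z)
--     return 'GOOD SET'
-- ===== Notes on version B (the rewrite author's own statement) =====
-- stated objective: simpler
-- what changed: Replaced A's two hash dictionaries (all prefixes seen so far, and all words seen so far) by a direct pairwise startswith scan of each word against the previously seen words.
import Mathlib
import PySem

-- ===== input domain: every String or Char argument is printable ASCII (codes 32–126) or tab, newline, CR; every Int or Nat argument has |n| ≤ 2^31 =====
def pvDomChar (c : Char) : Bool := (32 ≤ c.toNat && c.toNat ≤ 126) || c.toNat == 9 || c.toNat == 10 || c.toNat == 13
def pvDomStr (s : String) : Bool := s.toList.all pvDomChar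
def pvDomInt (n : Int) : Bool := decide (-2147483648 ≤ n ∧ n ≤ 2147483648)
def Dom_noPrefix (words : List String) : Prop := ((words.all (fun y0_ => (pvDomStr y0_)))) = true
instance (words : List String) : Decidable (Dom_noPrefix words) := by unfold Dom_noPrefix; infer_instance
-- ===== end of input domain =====

-- B replaces A's dictionaries of all prefixes / all seen words by a direct pairwise
-- startswith scan against previously seen words (objective: simpler).

-- ===== PORT A =====
-- Strings are handled as their character lists (dict keys are `z.toList`); this is the
-- exact Python string semantics (c += l becomes c ++ [l]).
-- inner loop `for l in z: c+=l; p[c]=1; if c in h: return BAD`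
def noPrefixWordLoop (z : String) : List Char → List Char → PySem.Dict (List Char) Nat →
    PySem.Dict (List Char) Nat → (PySem.Dict (List Char) Nat ⊕ String)
  | [], _, p, _ => Sum.inl p
  | l :: rest, c, p, h =>
    if h.contains (c ++ [l]) then Sum.inr ("BAD SET\n" ++ z)
    else noPrefixWordLoop z rest (c ++ [l]) (p.insert (c ++ [l]) 1) h

-- outer loop `for z in words`
def noPrefixLoop : List String → PySem.Dict (List Char) Nat → PySem.Dict (List Char) Nat → String
  | [], _, _ => "GOOD SET"
  | z :: rest, p, h =>
    if p.contains z.toList then "BAD SET\n" ++ z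
    else
      match noPrefixWordLoop z z.toList [] p h with
      | Sum.inr msg => msg
      | Sum.inl p' => noPrefixLoop rest p' (h.insert z.toList 1)

def noPrefix (words : List String) : String :=
  noPrefixLoop words PySem.Dict.empty PySem.Dict.empty

-- ===== PORT B =====
def noPrefixAltLoop : List String → List String → String
  | [], _ => "GOOD SET"
  | z :: rest, seen =>
    if seen.any (fun w => (decide (z ≠ "") && PySem.Str.startswith w z)
                       || (decide (w ≠ "") && PySem.Str.startswith z w))
    then "BAD SET\n" ++ z
    else noPrefixAltLoop rest (seen ++ [z])

def noPrefix_alt (words : List String) : String :=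
  noPrefixAltLoop words []

-- ===== PRECONDITION & SPEC =====
def Spec_noPrefix (words : List String) (out : String) : Prop := out = noPrefix_alt words
instance (words : List String) (out : String) : Decidable (Spec_noPrefix words out) := by unfold Spec_noPrefix; infer_instance

-- ===== CLAIM (what is proved, stated in full; the proofs are below) =====
def Claim_equal_noPrefix : Prop := ∀ (words : List String), Dom_noPrefix words → Spec_noPrefix words (noPrefix words)

-- ===== LEMMAS AND PROOFS =====

-- the nonempty prefixes of cs, each prepended with the accumulator c (the keys A's inner loop touches)
def preKeys : List Char → List Char → List (List Char)
  | _, [] => []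
  | c, l :: rest => (c ++ [l]) :: preKeys (c ++ [l]) rest

def insertAll (p : PySem.Dict (List Char) Nat) (ks : List (List Char)) : PySem.Dict (List Char) Nat :=
  ks.foldl (fun d k => d.insert k 1) p

theorem mem_preKeys (cs : List Char) : ∀ (c s : List Char),
    s ∈ preKeys c cs ↔ ∃ t, s = c ++ t ∧ t ≠ [] ∧ t <+: cs := by
  induction cs with
  | nil => simp [preKeys]
  | cons l rest ih =>
    intro c s
    simp only [preKeys, List.mem_cons, ih]
    constructor
    · rintro (rfl | ⟨t, rfl, ht, hpre⟩)
      · exact ⟨[l], rfl, by simp, ⟨rest, rfl⟩⟩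
      · exact ⟨l :: t, by simp, by simp, List.cons_prefix_cons.mpr ⟨rfl, hpre⟩⟩
    · rintro ⟨t, rfl, ht, hpre⟩
      rcases t with _ | ⟨a, t'⟩
      · exact absurd rfl ht
      · obtain ⟨u, hu⟩ := hpre
        have hal : a = l := by injection hu
        have ht' : t' <+: rest := ⟨u, by injection hu⟩
        subst hal
        by_cases h0 : t' = []
        · subst h0; left; rfl
        · right; exact ⟨t', by simp, h0, ht'⟩

theorem contains_insertAll (ks : List (List Char)) : ∀ (p : PySem.Dict (List Char) Nat) (s : List Char),
    (insertAll p ks).contains s = (p.contains s || decide (s ∈ ks)) := by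
  induction ks with
  | nil => simp [insertAll]
  | cons k rest ih =>
    intro p s
    simp only [insertAll, List.foldl_cons]
    rw [show (List.foldl (fun d k => d.insert k 1) (p.insert k 1) rest) = insertAll (p.insert k 1) rest from rfl,
        ih, PySem.Dict.contains_insert]
    simp only [List.mem_cons]
    by_cases h1 : s = k <;> by_cases h2 : s ∈ rest <;> simp [h1, h2]

theorem wordLoop_eq (z : String) (h : PySem.Dict (List Char) Nat) : ∀ (cs c : List Char) (p : PySem.Dict (List Char) Nat),
    noPrefixWordLoop z cs c p h =
      if (preKeys c cs).any h.contains then Sum.inr ("BAD SET\n" ++ z)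
      else Sum.inl (insertAll p (preKeys c cs)) := by
  intro cs
  induction cs with
  | nil => intro c p; simp [noPrefixWordLoop, preKeys, insertAll]
  | cons l rest ih =>
    intro c p
    simp only [noPrefixWordLoop, preKeys, List.any_cons]
    by_cases hc : h.contains (c ++ [l]) = true
    · simp [hc]
    · rw [if_neg hc, ih]
      by_cases ha : (preKeys (c ++ [l]) rest).any h.contains = true
      · simp [ha, hc]
      · simp [ha, hc, insertAll]

-- invariants tying A's dictionaries to B's list of seen words
def InvP (p : PySem.Dict (List Char) Nat) (seen : List String) : Prop :=
  ∀ s, p.contains s = true ↔ ∃ w ∈ seen, s ≠ [] ∧ s <+: w.toList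

def InvH (h : PySem.Dict (List Char) Nat) (seen : List String) : Prop :=
  ∀ s, h.contains s = true ↔ ∃ w ∈ seen, s = w.toList

theorem toList_ne_nil_iff (z : String) : z.toList ≠ [] ↔ z ≠ "" := by
  constructor
  · intro h hz; exact h (by simp [hz])
  · intro h hl
    exact h (by
      have : z.toList = ("" : String).toList := by simpa using hl
      exact String.toList_inj.mp this)

-- B's per-word test, characterised
theorem any_cond_iff (z : String) (seen : List String) :
    (seen.any (fun w => (decide (z ≠ "") && PySem.Str.startswith w z)
                     || (decide (w ≠ "") && PySem.Str.startswith z w))) = true ↔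
      ∃ w ∈ seen, (z.toList ≠ [] ∧ z.toList <+: w.toList) ∨ (w.toList ≠ [] ∧ w.toList <+: z.toList) := by
  rw [List.any_eq_true]
  constructor
  · rintro ⟨w, hw, hcond⟩
    refine ⟨w, hw, ?_⟩
    rcases Bool.or_eq_true_iff.mp hcond with h | h
    · rcases Bool.and_eq_true_iff.mp h with ⟨h1, h2⟩
      exact Or.inl ⟨(toList_ne_nil_iff z).mpr (of_decide_eq_true h1),
        (PySem.Chars.startswith_iff _ _).mp (by simpa using h2)⟩
    · rcases Bool.and_eq_true_iff.mp h with ⟨h1, h2⟩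
      exact Or.inr ⟨(toList_ne_nil_iff w).mpr (of_decide_eq_true h1),
        (PySem.Chars.startswith_iff _ _).mp (by simpa using h2)⟩
  · rintro ⟨w, hw, h | h⟩ <;> refine ⟨w, hw, ?_⟩
    · exact Bool.or_eq_true_iff.mpr (Or.inl (Bool.and_eq_true_iff.mpr
        ⟨decide_eq_true ((toList_ne_nil_iff z).mp h.1),
         by simpa using (PySem.Chars.startswith_iff _ _).mpr h.2⟩))
    · exact Bool.or_eq_true_iff.mpr (Or.inr (Bool.and_eq_true_iff.mpr
        ⟨decide_eq_true ((toList_ne_nil_iff w).mp h.1),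
         by simpa using (PySem.Chars.startswith_iff _ _).mpr h.2⟩))

theorem mem_preKeys_nil (z : String) (s : List Char) :
    s ∈ preKeys [] z.toList ↔ s ≠ [] ∧ s <+: z.toList := by
  rw [mem_preKeys]
  constructor
  · rintro ⟨t, rfl, ht, hpre⟩; simpa using ⟨ht, hpre⟩
  · rintro ⟨h1, h2⟩; exact ⟨s, by simp, h1, h2⟩

theorem main_loop_eq : ∀ (words seen : List String) (p h : PySem.Dict (List Char) Nat),
    InvP p seen → InvH h seen → noPrefixLoop words p h = noPrefixAltLoop words seen := by
  intro words
  induction words with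
  | nil => intro seen p h _ _; rfl
  | cons z rest ih =>
    intro seen p h hp hh
    simp only [noPrefixLoop, noPrefixAltLoop]
    rw [wordLoop_eq]
    by_cases hb : (seen.any (fun w => (decide (z ≠ "") && PySem.Str.startswith w z)
                     || (decide (w ≠ "") && PySem.Str.startswith z w))) = true
    · -- B says BAD; show A says BAD too
      rw [if_pos hb]
      rcases (any_cond_iff z seen).mp hb with ⟨w, hw, hcase⟩
      by_cases hpz : p.contains z.toList
      · rw [if_pos hpz]
      · rw [if_neg hpz]
        have hbad : (preKeys [] z.toList).any h.contains = true := by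
          rcases hcase with ⟨h1, h2⟩ | ⟨h1, h2⟩
          · exact absurd ((hp z.toList).mpr ⟨w, hw, h1, h2⟩) hpz
          · exact List.any_eq_true.mpr ⟨w.toList, (mem_preKeys_nil z _).mpr ⟨h1, h2⟩,
              (hh w.toList).mpr ⟨w, hw, rfl⟩⟩
        rw [if_pos hbad]
    · -- B says not bad at z: A's two checks both fail; recurse
      rw [if_neg hb]
      have hnall : ∀ w ∈ seen, ¬ ((z.toList ≠ [] ∧ z.toList <+: w.toList) ∨ (w.toList ≠ [] ∧ w.toList <+: z.toList)) := by
        intro w hw hcon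
        exact hb ((any_cond_iff z seen).mpr ⟨w, hw, hcon⟩)
      have hpz : ¬ p.contains z.toList = true := by
        intro hc
        rcases (hp z.toList).mp hc with ⟨w, hw, h1, h2⟩
        exact hnall w hw (Or.inl ⟨h1, h2⟩)
      rw [if_neg hpz]
      have hgood : ¬ ((preKeys [] z.toList).any h.contains = true) := by
        intro hc
        rcases List.any_eq_true.mp hc with ⟨s, hs, hsc⟩
        rcases (hh s).mp hsc with ⟨w, hw, rfl⟩
        rcases (mem_preKeys_nil z _).mp hs with ⟨h1, h2⟩
        exact hnall w hw (Or.inr ⟨h1, h2⟩)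
      rw [if_neg hgood]
      apply ih
      · -- InvP for updated p
        intro s
        rw [contains_insertAll]
        constructor
        · intro hc
          rcases Bool.or_eq_true_iff.mp hc with hc | hc
          · rcases (hp s).mp hc with ⟨w, hw, h1, h2⟩
            exact ⟨w, by simp [hw], h1, h2⟩
          · rcases (mem_preKeys_nil z s).mp (of_decide_eq_true hc) with ⟨h1, h2⟩
            exact ⟨z, by simp, h1, h2⟩
        · rintro ⟨w, hw, h1, h2⟩
          rcases List.mem_append.mp hw with hw | hw
          · exact Bool.or_eq_true_iff.mpr (Or.inl ((hp s).mpr ⟨w, hw, h1, h2⟩))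
          · have hwz : w = z := by simpa using hw
            rw [hwz] at h2
            exact Bool.or_eq_true_iff.mpr (Or.inr (decide_eq_true ((mem_preKeys_nil z s).mpr ⟨h1, h2⟩)))
      · -- InvH for updated h
        intro s
        rw [PySem.Dict.contains_insert]
        constructor
        · intro hc
          rcases Bool.or_eq_true_iff.mp hc with hc | hc
          · exact ⟨z, by simp, by simpa using hc⟩
          · rcases (hh s).mp hc with ⟨w, hw, rfl⟩
            exact ⟨w, by simp [hw], rfl⟩
        · rintro ⟨w, hw, rfl⟩
          rcases List.mem_append.mp hw with hw | hw
          · exact Bool.or_eq_true_iff.mpr (Or.inr ((hh _).mpr ⟨w, hw, rfl⟩))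
          · have hwz : w = z := by simpa using hw
            exact Bool.or_eq_true_iff.mpr (Or.inl (by simp [hwz]))

-- ===== VERDICT (by name: the statement is the Claim_ definition above) =====
theorem noPrefix_spec : Claim_equal_noPrefix := by
  intro words _
  unfold Spec_noPrefix noPrefix noPrefix_alt
  exact main_loop_eq words [] _ _ (by intro s; simp [PySem.Dict.contains_empty])
    (by intro s; simp [PySem.Dict.contains_empty])
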